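-- pv_equiv track=rewrite | github.com/thirumurugan-git/kalki-site-scraping | all_in_one_download/kalki_all_in_one_download.py | alpha_numeric_page_number
-- ===== SOURCE A (Python) =====
-- def alpha_numeric_page_number(x):
--     try:
--         return int(x)
--     except:
--         pass
--
--     started = False
--     sending_number = ""
--     for char in x:
--         if char.isnumeric():
--             started = True
--             sending_number += char
--         elif started:
--             break
--     return int(sending_number)
-- ===== SOURCE B (Python) =====
-- def alpha_numeric_page_number(x):
--     try:
--         return int(x)
--     except:
--         pass
--     tokens = ''.join(c if c.isnumeric() else ' ' for c in x).split()
--     return int(tokens[0])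
-- ===== Notes on version B (the rewrite author's own statement) =====
-- stated objective: simpler
-- what changed: Replaces the flag-guarded accumulator loop with a mask-and-tokenize approach: every non-numeric character is blanked to a space, str.split() tokenizes the result, and the first token is the first contiguous numeric run.
import Mathlib
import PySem

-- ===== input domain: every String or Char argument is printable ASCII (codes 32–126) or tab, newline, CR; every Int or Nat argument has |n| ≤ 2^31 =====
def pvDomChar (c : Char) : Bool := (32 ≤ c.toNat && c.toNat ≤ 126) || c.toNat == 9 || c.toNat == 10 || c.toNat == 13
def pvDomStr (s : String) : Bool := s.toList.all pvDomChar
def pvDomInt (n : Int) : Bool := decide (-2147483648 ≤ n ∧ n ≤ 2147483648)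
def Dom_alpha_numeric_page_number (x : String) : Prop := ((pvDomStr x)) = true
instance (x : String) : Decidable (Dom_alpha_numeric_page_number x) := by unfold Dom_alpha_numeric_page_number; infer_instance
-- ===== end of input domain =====

-- B replaces A's flag-guarded accumulator loop by a mask-and-tokenize decomposition (simpler);
-- on the ASCII domain str.isnumeric is exactly the ASCII digit test, ported as Char.isDigit.

-- ===== PORT A =====
-- the for-loop with its `started` flag, `sending_number` accumulator and `break`
def pvALoop : List Char → Bool → List Char → List Char
  | [], _, acc => acc
  | c :: rest, started, acc =>
    if c.isDigit then pvALoop rest true (acc ++ [c])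
    else if started then acc else pvALoop rest started acc

def alpha_numeric_page_number (x : String) : Int :=
  match PySem.Int.ofStr? x with
  | some n => n
  | none => (PySem.Int.ofChars? (pvALoop x.toList false [])).getD 0  -- int("") raises: outside Pre_

-- ===== PORT B =====
-- Python's whitespace str.split(), on the space-masked string (only ' ' occurs as separator)
def pvSplit : List Char → List (List Char)
  | [] => []
  | c :: rest =>
    if c == ' ' then pvSplit rest
    else (c :: rest).takeWhile (fun d => !(d == ' '))
         :: pvSplit ((c :: rest).dropWhile (fun d => !(d == ' ')))
termination_by cs => cs.length
decreasing_by
  · simp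
  · rw [List.dropWhile_cons_of_pos (by simp_all)]
    exact Nat.lt_succ_of_le (List.length_dropWhile_le _ _)

def alpha_numeric_page_number_alt (x : String) : Int :=
  match PySem.Int.ofStr? x with
  | some n => n
  | none =>
    let masked := x.toList.map (fun c => if c.isDigit then c else ' ')
    let tokens := pvSplit masked
    (PySem.Int.ofChars? (tokens.headD [])).getD 0  -- tokens[0] on [] raises: outside Pre_

-- ===== PRECONDITION & SPEC =====
-- Pre_ excludes exactly the inputs on which Python A raises ValueError — int(x) fails and x
-- contains no digit (on the ASCII domain, isnumeric = ASCII digit); B raises there too.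
def Pre_alpha_numeric_page_number (x : String) : Prop :=
  (PySem.Int.ofStr? x).isSome = true ∨ x.toList.any Char.isDigit = true
instance (x : String) : Decidable (Pre_alpha_numeric_page_number x) := by
  unfold Pre_alpha_numeric_page_number; infer_instance
def pvWitness_alpha_numeric_page_number : String := "page 12a"

def Spec_alpha_numeric_page_number (x : String) (out : Int) : Prop := out = alpha_numeric_page_number_alt x
instance (x : String) (out : Int) : Decidable (Spec_alpha_numeric_page_number x out) := by unfold Spec_alpha_numeric_page_number; infer_instance

-- ===== CLAIM (what is proved, stated in full; the proofs are below) =====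
def Claim_equal_alpha_numeric_page_number : Prop := ∀ (x : String), Dom_alpha_numeric_page_number x → Pre_alpha_numeric_page_number x → Spec_alpha_numeric_page_number x (alpha_numeric_page_number x)

-- ===== LEMMAS AND PROOFS =====
lemma digit_ne_space {c : Char} (h : c.isDigit = true) : (c == ' ') = false := by
  by_contra hc
  rw [Bool.not_eq_false, beq_iff_eq] at hc
  subst hc
  exact absurd h (by decide)

lemma pvALoop_true (cs : List Char) (acc : List Char) :
    pvALoop cs true acc = acc ++ cs.takeWhile (fun c => c.isDigit) := by
  induction cs generalizing acc with
  | nil => simp [pvALoop]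
  | cons c rest ih =>
    by_cases h : c.isDigit <;> simp [pvALoop, h, ih]

lemma pvALoop_false (cs : List Char) (acc : List Char) :
    pvALoop cs false acc
      = acc ++ (cs.dropWhile (fun c => !c.isDigit)).takeWhile (fun c => c.isDigit) := by
  induction cs generalizing acc with
  | nil => simp [pvALoop]
  | cons c rest ih =>
    by_cases h : c.isDigit <;>
      simp [pvALoop, h, ih, pvALoop_true]

-- masking non-digits to spaces turns "take the non-space run" into "take the digit run"
lemma takeWhile_masked (cs : List Char) :
    (cs.map (fun c => if c.isDigit then c else ' ')).takeWhile (fun d => !(d == ' '))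
      = cs.takeWhile (fun c => c.isDigit) := by
  induction cs with
  | nil => rfl
  | cons c rest ih =>
    by_cases h : c.isDigit
    · simp [List.takeWhile, h, digit_ne_space h, ih]
    · simp [h]

-- the head token of the masked split is the first contiguous digit run
lemma pvSplit_masked_head (cs : List Char) :
    (pvSplit (cs.map (fun c => if c.isDigit then c else ' '))).headD []
      = (cs.dropWhile (fun c => !c.isDigit)).takeWhile (fun c => c.isDigit) := by
  induction cs with
  | nil => simp [pvSplit]
  | cons c rest ih =>
    by_cases h : c.isDigit
    · simp only [List.map, h, if_pos, List.dropWhile]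
      rw [pvSplit]
      simp [digit_ne_space h, List.takeWhile, h, takeWhile_masked]
    · simp only [List.map, h, List.dropWhile]
      rw [pvSplit]
      simpa [h] using ih

-- ===== VERDICT (by name: the statement is the Claim_ definition above) =====
theorem alpha_numeric_page_number_spec : Claim_equal_alpha_numeric_page_number := by
  intro x _ _
  unfold Spec_alpha_numeric_page_number alpha_numeric_page_number alpha_numeric_page_number_alt
  cases PySem.Int.ofStr? x with
  | some n => rfl
  | none =>
    rw [pvALoop_false, List.nil_append, ← pvSplit_masked_head]
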